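-- pv_equiv track=rewrite | github.com/diasalvt/adventofcode | 2024/5/solution.py | code_is_valid
-- ===== SOURCE A (Python) =====
-- from typing import TypeAlias
--
-- Requirements: TypeAlias = list[tuple[int, int]]
--
-- Code: TypeAlias = list[int]
--
-- def code_is_valid(reqs: Requirements, code: Code) -> bool:
--     for before, after in reqs:
--         try:
--             if code.index(before) >= code.index(after):
--                 return False
--         except ValueError:
--             pass
--     return True
-- ===== SOURCE B (Python) =====
-- def code_is_valid(reqs, code):
--     all_vals = set(code)
--     by_after = {}
--     for before, after in reqs:
--         by_after.setdefault(after, []).append(before)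
--     seen = set()
--     for v in code:
--         for before in by_after.get(v, []):
--             if before in all_vals and before not in seen:
--                 return False
--         seen.add(v)
--     return True
-- ===== Notes on version B (the rewrite author's own statement) =====
-- stated objective: faster
-- what changed: Replaced the per-requirement loop with repeated O(n) list.index scans by a single left-to-right pass over code maintaining a seen set, after indexing requirements in a dict keyed by their 'after' value.
import Mathlib
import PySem

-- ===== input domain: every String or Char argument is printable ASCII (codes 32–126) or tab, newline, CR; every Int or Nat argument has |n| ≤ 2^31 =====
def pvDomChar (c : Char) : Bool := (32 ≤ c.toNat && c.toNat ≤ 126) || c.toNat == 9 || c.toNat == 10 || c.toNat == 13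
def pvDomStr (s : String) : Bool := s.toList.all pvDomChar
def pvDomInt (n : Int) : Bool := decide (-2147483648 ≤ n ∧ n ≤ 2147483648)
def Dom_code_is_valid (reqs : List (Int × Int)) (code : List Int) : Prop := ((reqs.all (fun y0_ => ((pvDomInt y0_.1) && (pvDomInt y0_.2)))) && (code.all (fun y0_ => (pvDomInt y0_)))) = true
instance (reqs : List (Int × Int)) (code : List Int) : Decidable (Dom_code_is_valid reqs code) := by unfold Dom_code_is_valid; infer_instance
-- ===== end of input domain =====

-- B replaces A's per-requirement loop of repeated list.index scans by one pass over `code`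
-- with a seen set, after grouping requirements in a dict keyed by their 'after' value (faster).

-- ===== PORT A =====
-- for before, after in reqs: try: if code.index(before) >= code.index(after): return False; except ValueError: pass
def code_is_valid (reqs : List (Int × Int)) (code : List Int) : Bool :=
  match reqs with
  | [] => true
  | (before, after) :: rest =>
    match PySem.List.index? code before, PySem.List.index? code after with
    | some i, some j => if j ≤ i then false else code_is_valid rest code
    | _, _ => code_is_valid rest code   -- ValueError from either .index -> pass

-- ===== PORT B =====
-- by_after: dict mapping each 'after' value to the list of its paired 'before' values
def pvByAfter (reqs : List (Int × Int)) : PySem.Dict Int (List Int) :=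
  reqs.foldl (fun d p => d.insert p.2 (d.getD p.2 [] ++ [p.1])) PySem.Dict.empty

-- the single pass over code with the seen set
def pvScan (allVals : PySem.Set Int) (byAfter : PySem.Dict Int (List Int)) :
    List Int → PySem.Set Int → Bool
  | [], _ => true
  | v :: rest, seen =>
    if (byAfter.getD v []).any
        (fun b => PySem.Set.contains allVals b && !(PySem.Set.contains seen b)) then false
    else pvScan allVals byAfter rest (PySem.Set.add seen v)

def code_is_valid_alt (reqs : List (Int × Int)) (code : List Int) : Bool :=
  pvScan (PySem.Set.ofList code) (pvByAfter reqs) code PySem.Set.empty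

-- ===== PRECONDITION & SPEC =====
def Spec_code_is_valid (reqs : List (Int × Int)) (code : List Int) (out : Bool) : Prop := out = code_is_valid_alt reqs code
instance (reqs : List (Int × Int)) (code : List Int) (out : Bool) : Decidable (Spec_code_is_valid reqs code out) := by unfold Spec_code_is_valid; infer_instance

-- ===== CLAIM (what is proved, stated in full; the proofs are below) =====
def Claim_equal_code_is_valid : Prop := ∀ (reqs : List (Int × Int)) (code : List Int), Dom_code_is_valid reqs code → Spec_code_is_valid reqs code (code_is_valid reqs code)

-- ===== LEMMAS AND PROOFS =====

-- the common characterisation: some requirement (b, a), with both b and a present in code,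
-- has first occurrence of b at or after first occurrence of a
def pvBad (reqs : List (Int × Int)) (code : List Int) : Prop :=
  ∃ p ∈ reqs, ∃ i j, PySem.List.index? code p.1 = some i ∧
    PySem.List.index? code p.2 = some j ∧ j ≤ i

lemma a_false_iff (reqs : List (Int × Int)) (code : List Int) :
    code_is_valid reqs code = false ↔ pvBad reqs code := by
  induction reqs with
  | nil => simp [code_is_valid, pvBad]
  | cons p rest ih =>
    obtain ⟨b, a⟩ := p
    rw [code_is_valid]
    cases hb : PySem.List.index? code b with
    | none =>
      simp only [ih, pvBad, List.mem_cons]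
      constructor
      · rintro ⟨q, hq, w⟩; exact ⟨q, Or.inr hq, w⟩
      · rintro ⟨q, hq | hq, i, j, hi, hj, hle⟩
        · cases hq
          simp only [PySem.List.index?_eq_idxOf?] at hb
          simp [hb] at hi
        · exact ⟨q, hq, i, j, hi, hj, hle⟩
    | some i =>
      cases ha : PySem.List.index? code a with
      | none =>
        simp only [ih, pvBad, List.mem_cons]
        constructor
        · rintro ⟨q, hq, w⟩; exact ⟨q, Or.inr hq, w⟩
        · rintro ⟨q, hq | hq, i', j, hi, hj, hle⟩
          · cases hq
            simp only [PySem.List.index?_eq_idxOf?] at ha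
            simp [ha] at hj
          · exact ⟨q, hq, i', j, hi, hj, hle⟩
      | some j =>
        by_cases hle : j ≤ i
        · simp only [if_pos hle, pvBad]
          constructor
          · intro _; exact ⟨(b, a), List.mem_cons_self, i, j, hb, ha, hle⟩
          · intro _; trivial
        · simp only [if_neg hle, ih, pvBad, List.mem_cons]
          constructor
          · rintro ⟨q, hq, w⟩; exact ⟨q, Or.inr hq, w⟩
          · rintro ⟨q, hq | hq, i', j', hi, hj, hle'⟩
            · cases hq
              rw [hb] at hi; rw [ha] at hj
              cases hi; cases hj; omega
            · exact ⟨q, hq, i', j', hi, hj, hle'⟩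

-- membership in the by_after dict ↔ the ordered pair is a requirement
lemma byAfter_mem (reqs : List (Int × Int)) (b a : Int) :
    b ∈ (pvByAfter reqs).getD a [] ↔ (b, a) ∈ reqs := by
  have key : ∀ (l : List (Int × Int)) (d : PySem.Dict Int (List Int)),
      b ∈ (l.foldl (fun d p => d.insert p.2 (d.getD p.2 [] ++ [p.1])) d).getD a [] ↔
        b ∈ d.getD a [] ∨ (b, a) ∈ l := by
    intro l
    induction l with
    | nil => simp
    | cons p rest ih =>
      intro d
      obtain ⟨pb, pa⟩ := p
      simp only [List.foldl_cons, ih, List.mem_cons]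
      by_cases hk : pa = a
      · subst hk
        simp only [PySem.Dict.getD, PySem.Dict.get?_insert_self, Option.getD_some,
          List.mem_append, List.mem_singleton]
        constructor
        · rintro (⟨h | h⟩ | h)
          · exact Or.inl h
          · subst h; exact Or.inr (Or.inl rfl)
          · exact Or.inr (Or.inr h)
        · rintro (h | h | h)
          · exact Or.inl (Or.inl h)
          · cases h; exact Or.inl (Or.inr rfl)
          · exact Or.inr h
      · rw [PySem.Dict.getD, PySem.Dict.get?_insert_of_ne _ _ (Ne.symm hk),
          ← PySem.Dict.getD]
        constructor
        · rintro (h | h)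
          · exact Or.inl h
          · exact Or.inr (Or.inr h)
        · rintro (h | h | h)
          · exact Or.inl h
          · exact absurd (congrArg Prod.snd h).symm hk
          · exact Or.inr h
  rw [pvByAfter, key]
  simp [PySem.Dict.getD, PySem.Dict.empty, PySem.Dict.get?]

lemma set_add_ofList (pre : List Int) (v : Int) :
    PySem.Set.add (PySem.Set.ofList pre) v = PySem.Set.ofList (pre ++ [v]) := by
  simp [PySem.Set.ofList_eq_foldl]

-- the scan returns false iff some position k of the suffix triggers the inner check
lemma scan_false_iff (S : PySem.Set Int) (D : PySem.Dict Int (List Int)) :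
    ∀ (suf pre : List Int),
      pvScan S D suf (PySem.Set.ofList pre) = false ↔
        ∃ k, ∃ hk : k < suf.length, ∃ b ∈ D.getD suf[k] [],
          b ∈ S ∧ b ∉ pre ++ suf.take k := by
  intro suf
  induction suf with
  | nil => simp [pvScan]
  | cons v rest ih =>
    intro pre
    rw [pvScan]
    by_cases hin : (D.getD v []).any
        (fun b => PySem.Set.contains S b && !(PySem.Set.contains (PySem.Set.ofList pre) b)) = true
    · rw [if_pos hin]
      simp only [List.any_eq_true, Bool.and_eq_true, Bool.not_eq_true',
        PySem.Set.contains, List.contains_eq_mem, decide_eq_true_eq,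
        decide_eq_false_iff_not, PySem.Set.mem_ofList] at hin
      obtain ⟨b, hbD, hbS, hbpre⟩ := hin
      constructor
      · intro _
        exact ⟨0, by simp, b, by simpa using hbD, hbS, by simpa using hbpre⟩
      · intro _; rfl
    · rw [if_neg hin, set_add_ofList, ih]
      simp only [List.any_eq_true, Bool.and_eq_true, Bool.not_eq_true',
        PySem.Set.contains, List.contains_eq_mem, decide_eq_true_eq,
        decide_eq_false_iff_not, PySem.Set.mem_ofList, not_exists, not_and] at hin
      constructor
      · rintro ⟨k, hk, b, hbD, hbS, hbpre⟩
        refine ⟨k + 1, by simp only [List.length_cons]; omega, b, ?_, hbS, ?_⟩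
        · simpa using hbD
        · simpa [List.append_assoc] using hbpre
      · rintro ⟨k, hk, b, hbD, hbS, hbpre⟩
        cases k with
        | zero =>
          exfalso
          simp only [List.take_zero, List.append_nil] at hbpre
          exact (hin b (by simpa using hbD) hbS) hbpre
        | succ k =>
          refine ⟨k, by simp only [List.length_cons] at hk; omega, b,
            by simpa using hbD, hbS, ?_⟩
          simpa [List.append_assoc] using hbpre

lemma not_mem_take_iff (code : List Int) (b : Int) (k : Nat) :
    b ∉ code.take k ↔ ∀ m, m < k → ∀ hm : m < code.length, code[m] ≠ b := by
  constructor
  · intro h m hmk hm hc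
    exact h (List.mem_take_iff_getElem.mpr ⟨m, by omega, hc⟩)
  · intro h hmem
    obtain ⟨m, hm, he⟩ := List.mem_take_iff_getElem.mp hmem
    exact h m (by omega) (by omega) he

lemma b_false_iff (reqs : List (Int × Int)) (code : List Int) :
    code_is_valid_alt reqs code = false ↔ pvBad reqs code := by
  rw [code_is_valid_alt]
  have h0 : (PySem.Set.empty : PySem.Set Int) = PySem.Set.ofList [] := rfl
  rw [h0, scan_false_iff]
  constructor
  · rintro ⟨k, hk, b, hbD, hbS, hbpre⟩
    rw [byAfter_mem] at hbD
    simp only [List.nil_append] at hbpre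
    rw [PySem.Set.mem_ofList] at hbS
    obtain ⟨i, hi⟩ := Option.isSome_iff_exists.mp
      ((PySem.List.index?_isSome_iff code b).mpr hbS)
    obtain ⟨j, hj⟩ := Option.isSome_iff_exists.mp
      ((PySem.List.index?_isSome_iff code code[k]).mpr (List.getElem_mem hk))
    refine ⟨(b, code[k]), hbD, i, j, hi, hj, ?_⟩
    -- j ≤ k since code[k] occurs at k; k ≤ i since b has no occurrence before k
    obtain ⟨hjlen, hje, hjmin⟩ := PySem.List.getElem_of_index?_eq_some hj
    have hjk : j ≤ k := by
      by_contra hc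
      exact hjmin k (by omega) rfl
    obtain ⟨hilen, hie, himin⟩ := PySem.List.getElem_of_index?_eq_some hi
    have hki : k ≤ i := by
      by_contra hc
      push Not at hc
      exact hbpre (List.mem_take_iff_getElem.mpr ⟨i, by omega, hie⟩)
    omega
  · rintro ⟨⟨b, a⟩, hp, i, j, hi, hj, hle⟩
    obtain ⟨hjlen, hje, hjmin⟩ := PySem.List.getElem_of_index?_eq_some hj
    obtain ⟨hilen, hie, himin⟩ := PySem.List.getElem_of_index?_eq_some hi
    refine ⟨j, hjlen, b, ?_, ?_, ?_⟩
    · rw [hje, byAfter_mem]; exact hp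
    · rw [PySem.Set.mem_ofList]
      have := List.getElem_mem hilen
      rw [hie] at this
      exact this
    · simp only [List.nil_append]
      rw [not_mem_take_iff]
      intro m hmj hm hc
      exact himin m (by omega) hc

-- ===== VERDICT (by name: the statement is the Claim_ definition above) =====
theorem code_is_valid_spec : Claim_equal_code_is_valid := by
  intro reqs code _
  unfold Spec_code_is_valid
  have ha := a_false_iff reqs code
  have hb := b_false_iff reqs code
  cases h1 : code_is_valid reqs code <;> cases h2 : code_is_valid_alt reqs code <;>
    simp_all
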